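-- pv_equiv track=rewrite | github.com/anpa/aoc2023 | day_02/main.py | fewest_number_of_cubes
-- ===== SOURCE A (Python) =====
-- def fewest_number_of_cubes(game):
--     max_red = 0
--     max_green = 0
--     max_blue = 0
--
--     for set in game:
--         for group in set.split(", "):
--             [number, color] = group.split(" ")
--
--             if (color == "red"):
--                 max_red = max(max_red, int(number))
--             elif (color == "green"):
--                 max_green = max(max_green, int(number))
--             elif (color == "blue"):
--                 max_blue = max(max_blue, int(number))
--
--     return [max_red, max_green, max_blue]
-- ===== SOURCE B (Python) =====
-- def fewest_number_of_cubes(game):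
--     def max_count(color):
--         best = 0
--         for s in game:
--             for group in s.split(", "):
--                 [number, c] = group.split(" ")
--                 if c == color:
--                     best = max(best, int(number))
--         return best
--     return [max_count("red"), max_count("green"), max_count("blue")]
-- ===== Notes on version B (the rewrite author's own statement) =====
-- stated objective: alternative
-- what changed: B replaces A's single fused pass with three running maxima and an if/elif color chain by three independent full scans of the game, one per color, each computing that one color's maximum with a single accumulator; it trades a constant factor of extra traversal for a per-color decomposition.
import Mathlib
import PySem

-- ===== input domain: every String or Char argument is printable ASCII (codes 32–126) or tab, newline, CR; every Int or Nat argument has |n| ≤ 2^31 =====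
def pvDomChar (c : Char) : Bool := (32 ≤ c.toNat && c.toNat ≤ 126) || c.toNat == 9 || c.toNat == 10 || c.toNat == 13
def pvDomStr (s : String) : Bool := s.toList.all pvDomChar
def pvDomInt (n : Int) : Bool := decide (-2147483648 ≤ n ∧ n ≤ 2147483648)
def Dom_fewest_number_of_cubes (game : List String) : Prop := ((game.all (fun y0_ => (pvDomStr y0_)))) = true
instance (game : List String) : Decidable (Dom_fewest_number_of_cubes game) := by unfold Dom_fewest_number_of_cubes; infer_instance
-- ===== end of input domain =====

-- B replaces A's single fused pass with three running maxima by three independent per-color scans of the game; same asymptotic cost, different traversal.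


-- ===== PORT A =====
-- s.split(sep) for a nonempty literal sep: PySem.Str.split? is none only for sep = "", so getD [] is exact here
def fnSplit (s sep : String) : List String := (PySem.Str.split? s sep).getD []

-- one inner-loop step of A: destructure `group.split(" ")` into [number, color] (anything else is a
-- ValueError = none), then the if/elif chain updating the three running maxima
def fnaStep (st : Int × Int × Int) (group : String) : Option (Int × Int × Int) :=
  match fnSplit group " " with
  | [number, color] =>
      if color = "red" then (PySem.Int.ofStr? number).map (fun n => (max st.1 n, st.2.1, st.2.2))
      else if color = "green" then (PySem.Int.ofStr? number).map (fun n => (st.1, max st.2.1 n, st.2.2))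
      else if color = "blue" then (PySem.Int.ofStr? number).map (fun n => (st.1, st.2.1, max st.2.2 n))
      else some st
  | _ => none

def fewest_number_of_cubes (game : List String) : List Int :=
  match game.foldlM (fun st s => (fnSplit s ", ").foldlM fnaStep st) ((0:Int), (0:Int), (0:Int)) with
  | some (r, g, b) => [r, g, b]
  | none => []  -- unreachable under Pre_ (the Python raises ValueError there)

-- ===== PORT B =====
-- one inner-loop step of B's max_count(color): same destructuring, then update the single
-- accumulator only when the group's color is the one this pass is scanning for
def fnbStep (color : String) (best : Int) (group : String) : Option Int :=
  match fnSplit group " " with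
  | [number, c] =>
      if c = color then (PySem.Int.ofStr? number).map (fun n => max best n)
      else some best
  | _ => none

-- B's max_count: a full scan of the whole game for ONE color
def fnbMaxCount (game : List String) (color : String) : Option Int :=
  game.foldlM (fun best s => (fnSplit s ", ").foldlM (fnbStep color) best) (0:Int)

def fewest_number_of_cubes_alt (game : List String) : List Int :=
  match fnbMaxCount game "red", fnbMaxCount game "green", fnbMaxCount game "blue" with
  | some r, some g, some b => [r, g, b]
  | _, _, _ => []  -- unreachable under Pre_

-- ===== PRECONDITION & SPEC =====
-- Pre_ holds exactly where the Python A returns: every group splits on " " into exactly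
-- [number, color], and when color is red/green/blue, int(number) parses.
def fnGroupOk (g : String) : Bool :=
  match fnSplit g " " with
  | [number, color] =>
      !(color == "red" || color == "green" || color == "blue") || (PySem.Int.ofStr? number).isSome
  | _ => false

def Pre_fewest_number_of_cubes (game : List String) : Prop :=
  ∀ s ∈ game, ∀ gp ∈ fnSplit s ", ", fnGroupOk gp = true

instance (game : List String) : Decidable (Pre_fewest_number_of_cubes game) := by
  unfold Pre_fewest_number_of_cubes; infer_instance

def pvWitness_fewest_number_of_cubes : List String := ["3 red, 2 green", "1 blue, 12 red"]

def Spec_fewest_number_of_cubes (game : List String) (out : List Int) : Prop := out = fewest_number_of_cubes_alt game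
instance (game : List String) (out : List Int) : Decidable (Spec_fewest_number_of_cubes game out) := by
  unfold Spec_fewest_number_of_cubes; infer_instance

-- ===== CLAIM (what is proved, stated in full; the proofs are below) =====
def Claim_equal_fewest_number_of_cubes : Prop := ∀ (game : List String), Dom_fewest_number_of_cubes game → Pre_fewest_number_of_cubes game → Spec_fewest_number_of_cubes game (fewest_number_of_cubes game)

-- ===== LEMMAS AND PROOFS =====

-- on an OK group, A's triple step succeeds and its components are exactly the three per-color steps
theorem fn_step_rel (gp : String) (hok : fnGroupOk gp = true) (st : Int × Int × Int) :
    ∃ r' g' b', fnaStep st gp = some (r', g', b') ∧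
      fnbStep "red" st.1 gp = some r' ∧ fnbStep "green" st.2.1 gp = some g' ∧
      fnbStep "blue" st.2.2 gp = some b' := by
  unfold fnaStep fnbStep
  unfold fnGroupOk at hok
  rcases h : fnSplit gp " " with _ | ⟨n, _ | ⟨c, _ | ⟨x, rest⟩⟩⟩ <;> rw [h] at hok
  · exact absurd hok (by simp)
  · exact absurd hok (by simp)
  · by_cases hr : c = "red"
    · subst hr
      simp only [beq_self_eq_true, Bool.true_or, Bool.not_true, Bool.false_or] at hok
      obtain ⟨a, ha⟩ := Option.isSome_iff_exists.mp hok
      exact ⟨max st.1 a, st.2.1, st.2.2, by simp [ha], by simp [ha], by simp, by simp⟩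
    · by_cases hg : c = "green"
      · subst hg
        simp only [beq_self_eq_true, Bool.or_true, Bool.true_or, Bool.not_true, Bool.false_or] at hok
        obtain ⟨a, ha⟩ := Option.isSome_iff_exists.mp hok
        refine ⟨st.1, max st.2.1 a, st.2.2, ?_, ?_, ?_, ?_⟩ <;> simp [hr, ha]
      · by_cases hb : c = "blue"
        · subst hb
          simp only [beq_self_eq_true, Bool.or_true, Bool.not_true, Bool.false_or] at hok
          obtain ⟨a, ha⟩ := Option.isSome_iff_exists.mp hok
          refine ⟨st.1, st.2.1, max st.2.2 a, ?_, ?_, ?_, ?_⟩ <;> simp [hr, hg, ha]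
        · exact ⟨st.1, st.2.1, st.2.2, by simp [hr, hg, hb], by simp [hr], by simp [hg], by simp [hb]⟩
  · exact absurd hok (by simp)

-- lift to a list of OK groups
theorem fn_groups_rel (gs : List String) (hok : ∀ gp ∈ gs, fnGroupOk gp = true) (st : Int × Int × Int) :
    ∃ r' g' b', gs.foldlM fnaStep st = some (r', g', b') ∧
      gs.foldlM (fnbStep "red") st.1 = some r' ∧ gs.foldlM (fnbStep "green") st.2.1 = some g' ∧
      gs.foldlM (fnbStep "blue") st.2.2 = some b' := by
  induction gs generalizing st with
  | nil => exact ⟨st.1, st.2.1, st.2.2, rfl, rfl, rfl, rfl⟩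
  | cons gp gs ih =>
      obtain ⟨r1, g1, b1, ha, hr, hg, hb⟩ := fn_step_rel gp (hok gp (.head _)) st
      obtain ⟨r', g', b', ha', hr', hg', hb'⟩ := ih (fun x hx => hok x (.tail _ hx)) (r1, g1, b1)
      exact ⟨r', g', b', by rw [List.foldlM_cons, ha]; exact ha',
        by rw [List.foldlM_cons, hr]; exact hr', by rw [List.foldlM_cons, hg]; exact hg',
        by rw [List.foldlM_cons, hb]; exact hb'⟩

-- lift to the whole game
theorem fn_game_rel (game : List String)
    (hok : ∀ s ∈ game, ∀ gp ∈ fnSplit s ", ", fnGroupOk gp = true) (st : Int × Int × Int) :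
    ∃ r' g' b',
      game.foldlM (fun st s => (fnSplit s ", ").foldlM fnaStep st) st = some (r', g', b') ∧
      game.foldlM (fun best s => (fnSplit s ", ").foldlM (fnbStep "red") best) st.1 = some r' ∧
      game.foldlM (fun best s => (fnSplit s ", ").foldlM (fnbStep "green") best) st.2.1 = some g' ∧
      game.foldlM (fun best s => (fnSplit s ", ").foldlM (fnbStep "blue") best) st.2.2 = some b' := by
  induction game generalizing st with
  | nil => exact ⟨st.1, st.2.1, st.2.2, rfl, rfl, rfl, rfl⟩
  | cons s game ih =>
      obtain ⟨r1, g1, b1, ha, hr, hg, hb⟩ :=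
        fn_groups_rel (fnSplit s ", ") (hok s (.head _)) st
      obtain ⟨r', g', b', ha', hr', hg', hb'⟩ := ih (fun x hx => hok x (.tail _ hx)) (r1, g1, b1)
      exact ⟨r', g', b', by rw [List.foldlM_cons, ha]; exact ha',
        by rw [List.foldlM_cons, hr]; exact hr', by rw [List.foldlM_cons, hg]; exact hg',
        by rw [List.foldlM_cons, hb]; exact hb'⟩

-- ===== VERDICT (by name: the statement is the Claim_ definition above) =====
theorem fewest_number_of_cubes_spec : Claim_equal_fewest_number_of_cubes := by
  intro game _ hpre
  unfold Spec_fewest_number_of_cubes fewest_number_of_cubes fewest_number_of_cubes_alt fnbMaxCount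
  obtain ⟨r', g', b', ha, hr, hg, hb⟩ := fn_game_rel game hpre ((0:Int), (0:Int), (0:Int))
  rw [ha, hr, hg, hb]
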